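-- pv_equiv track=rewrite | github.com/lsshawn/cupbots-plugins | plugins/search/search.py | _parse_search_args
-- ===== SOURCE A (Python) =====
-- ALL_PLATFORMS = {"reddit", "youtube", "x"}
--
-- def _parse_search_args(args: list[str]) -> tuple[str, list[str]]:
--     """Split args into (query, platforms). Platform names at the end are extracted."""
--     if not args:
--         return "", []
--
--     # Check if last args are platform names
--     platforms = []
--     query_parts = list(args)
--
--     while query_parts and query_parts[-1].lower() in ALL_PLATFORMS:
--         platforms.insert(0, query_parts.pop().lower())
--
--     query = " ".join(query_parts)
--     return query, platforms
-- ===== SOURCE B (Python) =====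
-- ALL_PLATFORMS = {"reddit", "youtube", "x"}
--
-- def _parse_search_args(args: list[str]) -> tuple[str, list[str]]:
--     """Split args into (query, platforms). Platform names at the end are extracted."""
--     k = 0
--     for w in reversed(args):
--         if w.lower() in ALL_PLATFORMS:
--             k += 1
--         else:
--             break
--     b = len(args) - k
--     return " ".join(args[:b]), [w.lower() for w in args[b:]]
-- ===== Notes on version B (the rewrite author's own statement) =====
-- stated objective: simpler
-- what changed: Replaces the incremental while-pop/insert(0) two-list mutation with a single boundary index counted from the end plus two slices; the empty-args special case disappears.
import Mathlib
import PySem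

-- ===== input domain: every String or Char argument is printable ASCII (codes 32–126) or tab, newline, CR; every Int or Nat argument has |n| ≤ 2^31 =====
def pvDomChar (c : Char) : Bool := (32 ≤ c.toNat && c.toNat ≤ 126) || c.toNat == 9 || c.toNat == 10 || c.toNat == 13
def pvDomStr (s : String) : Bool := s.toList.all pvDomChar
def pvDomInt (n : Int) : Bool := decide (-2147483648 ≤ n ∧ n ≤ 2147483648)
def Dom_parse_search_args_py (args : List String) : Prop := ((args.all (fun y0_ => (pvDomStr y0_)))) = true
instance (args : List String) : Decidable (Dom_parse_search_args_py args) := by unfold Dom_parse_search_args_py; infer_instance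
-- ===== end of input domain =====

-- ===== PORT A =====
-- B computes the tail boundary once and slices, instead of A's while-pop/insert(0) loop (objective: simpler).
def pvALL_PLATFORMS : PySem.Set String := PySem.Set.ofList ["reddit", "youtube", "x"]

-- the while loop: pop platform names off the end of query_parts, insert(0) their lowercase into platforms
def pvLoopA : List String → List String → List String × List String
  | qp, ps =>
    if h : qp ≠ [] then
      if pvALL_PLATFORMS.contains (PySem.Str.lower (qp.getLast h)) then
        pvLoopA qp.dropLast (PySem.Str.lower (qp.getLast h) :: ps)
      else (qp, ps)
    else (qp, ps)
termination_by qp _ => qp.length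
decreasing_by simp [List.length_dropLast]; exact List.length_pos_iff.mpr h

def parse_search_args_py (args : List String) : String × List String :=
  if args = [] then ("", [])
  else
    let r := pvLoopA args []
    (PySem.Str.join " " r.1, r.2)

-- ===== PORT B =====
def parse_search_args_py_alt (args : List String) : String × List String :=
  let k := (args.reverse.takeWhile (fun w => pvALL_PLATFORMS.contains (PySem.Str.lower w))).length
  let b := args.length - k
  (PySem.Str.join " " (args.take b), (args.drop b).map PySem.Str.lower)

-- ===== PRECONDITION & SPEC =====
def Spec_parse_search_args_py (args : List String) (out : String × List String) : Prop := out = parse_search_args_py_alt args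
instance (args : List String) (out : String × List String) : Decidable (Spec_parse_search_args_py args out) := by unfold Spec_parse_search_args_py; infer_instance

-- ===== CLAIM (what is proved, stated in full; the proofs are below) =====
def Claim_equal_parse_search_args_py : Prop := ∀ (args : List String), Dom_parse_search_args_py args → Spec_parse_search_args_py args (parse_search_args_py args)

-- ===== LEMMAS AND PROOFS =====
theorem pvLoopA_eq (l ps : List String) :
    pvLoopA l ps =
      (l.take (l.length - (l.reverse.takeWhile (fun w => pvALL_PLATFORMS.contains (PySem.Str.lower w))).length),
       (l.drop (l.length - (l.reverse.takeWhile (fun w => pvALL_PLATFORMS.contains (PySem.Str.lower w))).length)).map PySem.Str.lower ++ ps) := by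
  induction l using List.reverseRecOn generalizing ps with
  | nil => simp [pvLoopA]
  | append_singleton xs x ih =>
    have hle : (xs.reverse.takeWhile (fun w => pvALL_PLATFORMS.contains (PySem.Str.lower w))).length ≤ xs.length := by
      calc (xs.reverse.takeWhile (fun w => pvALL_PLATFORMS.contains (PySem.Str.lower w))).length
          ≤ xs.reverse.length := (List.takeWhile_sublist _).length_le
        _ = xs.length := List.length_reverse
    rw [pvLoopA]
    have hne : xs ++ [x] ≠ [] := by simp
    rw [dif_pos hne]
    simp only [List.getLast_append, List.isEmpty_cons, Bool.false_eq_true, dite_false,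
      List.getLast_singleton, List.dropLast_concat]
    by_cases hp : pvALL_PLATFORMS.contains (PySem.Str.lower x)
    · have hm : PySem.Str.lower x ∈ pvALL_PLATFORMS := (PySem.Set.contains_iff _ _).mp hp
      rw [if_pos hp, ih]
      have hk : ((xs ++ [x]).reverse.takeWhile (fun w => pvALL_PLATFORMS.contains (PySem.Str.lower w))).length
          = (xs.reverse.takeWhile (fun w => pvALL_PLATFORMS.contains (PySem.Str.lower w))).length + 1 := by
        simp [hm]
      rw [hk]
      have hb : (xs ++ [x]).length - ((xs.reverse.takeWhile (fun w => pvALL_PLATFORMS.contains (PySem.Str.lower w))).length + 1)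
          = xs.length - (xs.reverse.takeWhile (fun w => pvALL_PLATFORMS.contains (PySem.Str.lower w))).length := by
        simp only [List.length_append, List.length_cons, List.length_nil]; omega
      rw [hb, List.take_append_of_le_length (by omega), List.drop_append_of_le_length (by omega)]
      simp
    · have hm : PySem.Str.lower x ∉ pvALL_PLATFORMS := fun hmem =>
        hp ((PySem.Set.contains_iff _ _).mpr hmem)
      have hk : ((xs ++ [x]).reverse.takeWhile (fun w => pvALL_PLATFORMS.contains (PySem.Str.lower w))) = [] := by
        simp [hm]
      rw [if_neg hp, hk]
      simp

-- ===== VERDICT (by name: the statement is the Claim_ definition above) =====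
theorem parse_search_args_py_spec : Claim_equal_parse_search_args_py := by
  intro args _
  unfold Spec_parse_search_args_py parse_search_args_py parse_search_args_py_alt
  by_cases h : args = []
  · subst h; decide
  · simp only [h, if_false, pvLoopA_eq, List.append_nil]
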